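-- pv_equiv track=rewrite | github.com/EdisonYLei/Improving-Feasibility-in-QAOA-for-VRP | AerQAOA-new.py | sampling_rank
-- ===== SOURCE A (Python) =====
-- def sampling_rank(counts_dict, opt_xstr_set):
--     """Rank of the optimal solution among sampled bitstrings ordered by frequency (1 = most frequent)."""
--     sorted_xstrs = sorted(counts_dict.keys(), key=lambda x: -counts_dict[x])
--     best_rank = None
--     for xstr in opt_xstr_set:
--         if xstr not in counts_dict:
--             continue
--         rank = 1 + sorted_xstrs.index(xstr)
--         if best_rank is None or rank < best_rank:
--             best_rank = rank
--     return best_rank if best_rank is not None else len(counts_dict) + 1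
-- ===== SOURCE B (Python) =====
-- def sampling_rank(counts_dict, opt_xstr_set):
--     """Rank of the optimal solution among sampled bitstrings ordered by frequency (1 = most frequent)."""
--     sorted_xstrs = sorted(counts_dict.keys(), key=lambda x: -counts_dict[x])
--     for rank, xstr in enumerate(sorted_xstrs, start=1):
--         if xstr in opt_xstr_set:
--             return rank
--     return len(counts_dict) + 1
-- ===== Notes on version B (the rewrite author's own statement) =====
-- stated objective: alternative
-- what changed: Replaces A's loop over the optimal set with a repeated sorted_xstrs.index() scan per optimal bitstring by a single early-exit pass over the frequency-sorted list, returning the first rank whose bitstring is optimal.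
import Mathlib
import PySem

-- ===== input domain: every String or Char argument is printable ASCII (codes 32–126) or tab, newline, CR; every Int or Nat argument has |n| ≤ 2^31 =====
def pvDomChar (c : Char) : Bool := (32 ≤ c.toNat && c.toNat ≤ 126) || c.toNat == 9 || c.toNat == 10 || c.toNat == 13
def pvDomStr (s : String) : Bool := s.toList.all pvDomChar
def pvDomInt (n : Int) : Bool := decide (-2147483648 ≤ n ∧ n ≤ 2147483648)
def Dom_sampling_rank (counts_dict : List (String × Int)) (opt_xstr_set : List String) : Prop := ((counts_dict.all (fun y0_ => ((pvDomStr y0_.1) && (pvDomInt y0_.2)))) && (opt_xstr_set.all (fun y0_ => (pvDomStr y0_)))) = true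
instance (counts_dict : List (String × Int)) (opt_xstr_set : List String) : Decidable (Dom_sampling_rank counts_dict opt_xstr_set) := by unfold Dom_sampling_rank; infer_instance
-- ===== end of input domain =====

-- B replaces A's loop over the optimal set (a repeated .index() scan per optimal bitstring) by one
-- early-exit pass over the frequency-sorted key list; same return value, alternative algorithm.

-- ===== PORT A =====
-- counts_dict[x] inside the sort key is only evaluated at keys of the dict, where it never
-- raises, so it is ported as getD with an irrelevant default; likewise .index() is only
-- reached under the membership guard, where it is found, so its Option is defaulted.
def sampling_rank (counts_dict : List (String × Int)) (opt_xstr_set : List String) : Int :=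
  let d := PySem.Dict.ofList counts_dict
  let sorted_xstrs := PySem.List.sorted (PySem.Dict.keys d) (fun x => -(PySem.Dict.getD d x 0)) false
  let best_rank : Option Int := opt_xstr_set.foldl
    (fun best_rank xstr =>
      if !(PySem.Dict.contains d xstr) then best_rank
      else
        let rank : Int := 1 + (((PySem.List.index? sorted_xstrs xstr).getD 0 : Nat) : Int)
        match best_rank with
        | none => some rank
        | some b => if rank < b then some rank else some b)
    none
  match best_rank with
  | some b => b
  | none => (PySem.Dict.size d : Int) + 1

-- ===== PORT B =====
-- the 'for rank, xstr in enumerate(sorted_xstrs, start=1)' loop with early return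
def samplingRankScan (opts : List String) (dflt : Int) : List String → Int → Int
  | [], _ => dflt
  | x :: rest, rank => if opts.contains x then rank else samplingRankScan opts dflt rest (rank + 1)

def sampling_rank_alt (counts_dict : List (String × Int)) (opt_xstr_set : List String) : Int :=
  let d := PySem.Dict.ofList counts_dict
  let sorted_xstrs := PySem.List.sorted (PySem.Dict.keys d) (fun x => -(PySem.Dict.getD d x 0)) false
  samplingRankScan opt_xstr_set ((PySem.Dict.size d : Int) + 1) sorted_xstrs 1

-- ===== PRECONDITION & SPEC =====
def Spec_sampling_rank (counts_dict : List (String × Int)) (opt_xstr_set : List String) (out : Int) : Prop := out = sampling_rank_alt counts_dict opt_xstr_set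
instance (counts_dict : List (String × Int)) (opt_xstr_set : List String) (out : Int) : Decidable (Spec_sampling_rank counts_dict opt_xstr_set out) := by unfold Spec_sampling_rank; infer_instance

-- ===== CLAIM (what is proved, stated in full; the proofs are below) =====
def Claim_equal_sampling_rank : Prop := ∀ (counts_dict : List (String × Int)) (opt_xstr_set : List String), Dom_sampling_rank counts_dict opt_xstr_set → Spec_sampling_rank counts_dict opt_xstr_set (sampling_rank counts_dict opt_xstr_set)

-- ===== LEMMAS AND PROOFS =====

-- option-valued minimum used to characterise A's fold
def omin : Option Int → Option Int → Option Int
  | none, o => o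
  | some b, none => some b
  | some b, some r => some (min b r)

theorem omin_none_right (o : Option Int) : omin o none = o := by cases o <;> rfl

theorem omin_some_min? (a : Int) (l : List Int) :
    omin (some a) l.min? = (a :: l).min? := by
  cases l with
  | nil => rfl
  | cons x xs => simp [omin, List.min?_cons]

theorem omin_assoc (o₁ o₂ o₃ : Option Int) : omin (omin o₁ o₂) o₃ = omin o₁ (omin o₂ o₃) := by
  cases o₁ <;> cases o₂ <;> cases o₃ <;> simp [omin, min_assoc]

-- A's fold computes the option-valued minimum of the ranks of the admitted strings
theorem foldA_eq (g : String → Bool) (f : String → Int) :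
    ∀ (S : List String) (o : Option Int),
      S.foldl (fun best x =>
        if !(g x) then best
        else match best with
          | none => some (f x)
          | some b => if f x < b then some (f x) else some b) o
      = omin o ((S.filter g).map f).min? := by
  intro S
  induction S with
  | nil => intro o; simp [omin_none_right]
  | cons x S ih =>
    intro o
    by_cases hg : g x
    · have step : (match o with
          | none => some (f x)
          | some b => if f x < b then some (f x) else some b) = omin o (some (f x)) := by
        cases o with
        | none => rfl
        | some b =>
          simp only [omin]
          by_cases h : f x < b
          · simp [h, min_eq_right (le_of_lt h)]
          · simp [h, min_eq_left (le_of_not_gt h)]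
      rw [List.foldl_cons, if_neg (by simp [hg]), step, ih,
        List.filter_cons_of_pos hg, List.map_cons, ← omin_some_min?, omin_assoc]
    · rw [List.foldl_cons, if_pos (by simp [hg]), ih,
        List.filter_cons_of_neg (by simp [hg])]

-- B's scan in terms of findIdx? over the sorted list
theorem scan_eq (opts : List String) (dflt : Int) :
    ∀ (L : List String) (r : Int),
      samplingRankScan opts dflt L r
      = match List.findIdx? (fun x => opts.contains x) L with
        | some k => r + (k : Int)
        | none => dflt := by
  intro L
  induction L with
  | nil => intro r; rfl
  | cons x rest ih =>
    intro r
    by_cases h : opts.contains x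
    · have h' : x ∈ opts := List.contains_iff_mem.mp h
      simp [samplingRankScan, h', List.findIdx?_cons]
    · simp only [samplingRankScan, ih, List.findIdx?_cons, h]
      cases hf : List.findIdx? (fun x => opts.contains x) rest <;> simp
      ring

-- the heart: the minimum rank over the optimal strings equals the first hit in the sorted list
theorem min_rank_eq_first_hit (L S : List String) :
    (((S.filter (fun x => decide (x ∈ L))).map
        (fun x => 1 + (((PySem.List.index? L x).getD 0 : Nat) : Int))).min?)
    = (List.findIdx? (fun x => S.contains x) L).map (fun k : Nat => 1 + (k : Int)) := by
  cases hf : List.findIdx? (fun x => S.contains x) L with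
  | none =>
    have hnone := List.findIdx?_eq_none_iff.mp hf
    have hfe : S.filter (fun x => decide (x ∈ L)) = [] := by
      rw [List.filter_eq_nil_iff]
      intro x hxS hxL
      have hxL' : x ∈ L := of_decide_eq_true hxL
      have hxs : x ∉ S := by simpa using hnone x hxL'
      exact hxs hxS
    simp [hfe]
  | some k =>
    obtain ⟨hk, hpk, hmin⟩ := List.findIdx?_eq_some_iff_getElem.mp hf
    have hLk : L[k] ∈ S := by simpa [List.contains_iff_mem] using hpk
    rw [Option.map_some, List.min?_eq_some_iff]
    constructor
    · -- the string at position k of L contributes exactly rank 1 + k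
      have hmem : L[k] ∈ S.filter (fun x => decide (x ∈ L)) := by
        simp [List.mem_filter, hLk, List.getElem_mem]
      refine List.mem_map.mpr ⟨L[k], hmem, ?_⟩
      obtain ⟨j, hj⟩ := Option.isSome_iff_exists.mp
        (((PySem.List.index?_isSome_iff L (L[k]))).mpr (List.getElem_mem hk))
      obtain ⟨hjlt, hje, hjmin⟩ := PySem.List.getElem_of_index?_eq_some hj
      have hjk : j = k := by
        rcases lt_trichotomy j k with h | h | h
        · exact absurd (by simpa [List.contains_iff_mem, hje] using hLk) (hmin j h)
        · exact h
        · exact absurd rfl (hjmin k h)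
      have hik : PySem.List.index? L (L[k]) = some k := by rw [hj, hjk]
      rw [hik, Option.getD_some]
    · -- every admitted string has rank at least 1 + k
      intro b hb
      obtain ⟨x, hxf, hxb⟩ := List.mem_map.mp hb
      obtain ⟨hxS, hxLd⟩ := List.mem_filter.mp hxf
      have hxL : x ∈ L := of_decide_eq_true hxLd
      obtain ⟨j, hj⟩ := Option.isSome_iff_exists.mp
        (((PySem.List.index?_isSome_iff L x)).mpr hxL)
      obtain ⟨hjlt, hje, _⟩ := PySem.List.getElem_of_index?_eq_some hj
      have hkj : ¬ j < k := fun hlt =>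
        (hmin j hlt) (by simpa [List.contains_iff_mem, hje] using hxS)
      have hkj' : k ≤ j := Nat.le_of_not_lt hkj
      rw [← hxb]
      simp only [hj, Option.getD_some]
      omega

-- ===== VERDICT (by name: the statement is the Claim_ definition above) =====
theorem sampling_rank_spec : Claim_equal_sampling_rank := by
  intro counts_dict opt_xstr_set _
  unfold Spec_sampling_rank
  simp only [sampling_rank, sampling_rank_alt]
  set d := PySem.Dict.ofList counts_dict with hd
  set L := PySem.List.sorted (PySem.Dict.keys d) (fun x => -(PySem.Dict.getD d x 0)) false with hL
  have hcont : ∀ x, PySem.Dict.contains d x = decide (x ∈ L) := by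
    intro x
    have h1 : (PySem.Dict.contains d x = true) ↔ x ∈ L :=
      (PySem.Dict.contains_iff_mem_keys d x).trans
        (PySem.List.mem_sorted (PySem.Dict.keys d) _ false x).symm
    cases hb : PySem.Dict.contains d x with
    | false => rw [hb] at h1; simp at h1; simp [h1]
    | true => rw [hb] at h1; simp [h1.mp rfl]
  rw [foldA_eq (fun x => PySem.Dict.contains d x)
        (fun x => 1 + (((PySem.List.index? L x).getD 0 : Nat) : Int)) opt_xstr_set none,
      List.filter_congr (fun x _ => hcont x),
      min_rank_eq_first_hit L opt_xstr_set,
      scan_eq opt_xstr_set ((PySem.Dict.size d : Int) + 1) L 1]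
  cases List.findIdx? (fun x => opt_xstr_set.contains x) L <;> simp [omin]
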